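-- pv_equiv track=rewrite | github.com/meric-chenu/projet_Enigma | decryption.py | rotation_right_rotor
-- ===== SOURCE A (Python) =====
-- def rotation_right_rotor(rotor):
--     letter_memory = None
--     letter_memory2 = None
--     final_letter = rotor[len(rotor)-1]
--     for index in range(len(rotor)):
--         if(index != len(rotor)-1):
--             if(index == 0):
--                 current_index = rotor[index]
--                 letter_memory = rotor[index+1]
--                 rotor[index+1] = rotor[index]
--             else:
--                 current_index = rotor[index]
--                 letter_memory2 = rotor[index+1]
--                 rotor[index+1] = letter_memory
--                 letter_memory = letter_memory2
--         else:
--             rotor[0] = final_letter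
--     return rotor
-- ===== SOURCE B (Python) =====
-- def rotation_right_rotor(rotor):
--     rotor.insert(0, rotor.pop())
--     return rotor
-- ===== Notes on version B (the rewrite author's own statement) =====
-- stated objective: simpler
-- what changed: Replaces the manual element-by-element shifting loop with two temp variables by a single pop of the last element reinserted at the front (pop/insert, no loop, no temporaries).
-- outside the precondition, e.g. on rotation_right_rotor([]): A raises IndexError, B raises IndexError
import Mathlib
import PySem

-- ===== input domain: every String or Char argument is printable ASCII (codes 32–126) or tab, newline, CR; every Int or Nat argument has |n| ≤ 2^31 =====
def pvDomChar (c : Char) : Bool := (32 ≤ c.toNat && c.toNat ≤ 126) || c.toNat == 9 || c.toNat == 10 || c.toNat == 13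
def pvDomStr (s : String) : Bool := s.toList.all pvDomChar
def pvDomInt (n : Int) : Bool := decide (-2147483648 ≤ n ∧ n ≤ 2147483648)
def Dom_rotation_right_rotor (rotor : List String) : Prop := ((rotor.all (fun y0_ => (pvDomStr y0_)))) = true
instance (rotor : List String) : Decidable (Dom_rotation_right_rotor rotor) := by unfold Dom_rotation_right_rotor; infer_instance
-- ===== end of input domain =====

-- B replaces A's element-by-element shifting loop (two temp variables) with one pop of the
-- last element reinserted at the front; B mutates the list in place exactly like A does —
-- the theorems here are about the RETURN value.

-- ===== PORT A =====
-- the loop body; state: (rotor, letter_memory, letter_memory2), Options since they start as None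
def pvStepA (n : Int) (final_letter : String)
    (st : List String × Option String × Option String) (index : Int) :
    List String × Option String × Option String :=
  if index ≠ n - 1 then
    if index = 0 then
      let lm' := PySem.List.pyGetD st.1 (index + 1) ""
      (PySem.List.pySetD st.1 (index + 1) (PySem.List.pyGetD st.1 index ""), some lm', st.2.2)
    else
      let lm2' := PySem.List.pyGetD st.1 (index + 1) ""
      -- st.2.1.getD "" : letter_memory is never None here on any reachable iteration
      (PySem.List.pySetD st.1 (index + 1) (st.2.1.getD ""), some lm2', some lm2')
  else
    (PySem.List.pySetD st.1 0 final_letter, st.2.1, st.2.2)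

def rotation_right_rotor (rotor : List String) : List String :=
  match PySem.List.pyGet? rotor ((rotor.length : Int) - 1) with
  | none => []  -- rotor[len(rotor)-1] raises IndexError on []; excluded by Pre_
  | some final_letter =>
    ((PySem.List.pyRange 0 (rotor.length : Int) 1).foldl
      (pvStepA (rotor.length : Int) final_letter) (rotor, none, none)).1

-- ===== PORT B =====
def rotation_right_rotor_alt (rotor : List String) : List String :=
  match PySem.List.pop? rotor with
  | none => []  -- rotor.pop() raises IndexError on []; excluded by Pre_
  | some (x, rest) => PySem.List.insert rest 0 x

-- ===== PRECONDITION & SPEC =====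
-- A indexes rotor[len(rotor)-1] before the loop, so it raises IndexError on the empty list.
def Pre_rotation_right_rotor (rotor : List String) : Prop := rotor ≠ []
instance (rotor : List String) : Decidable (Pre_rotation_right_rotor rotor) := by
  unfold Pre_rotation_right_rotor; infer_instance
def pvWitness_rotation_right_rotor : List String := ["a", "b", "c"]
def Spec_rotation_right_rotor (rotor : List String) (out : List String) : Prop :=
  out = rotation_right_rotor_alt rotor
instance (rotor : List String) (out : List String) : Decidable (Spec_rotation_right_rotor rotor out) := by
  unfold Spec_rotation_right_rotor; infer_instance

-- ===== CLAIM =====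
def Claim_equal_rotation_right_rotor : Prop := ∀ (rotor : List String),
  Dom_rotation_right_rotor rotor → Pre_rotation_right_rotor rotor →
  Spec_rotation_right_rotor rotor (rotation_right_rotor rotor)

-- ===== LEMMAS AND PROOFS =====

-- loop invariant: after iterations 0,…,k-1 (1 ≤ k ≤ len-1) the list is
-- head :: first k elements ++ elements after position k, and letter_memory = rotor[k]
theorem pvInvA (rotor : List String) (fl : String) (k : Nat)
    (h1 : 1 ≤ k) (hk : k + 1 ≤ rotor.length) :
    ∃ lm2, (PySem.List.pyRange 0 (k : Int) 1).foldl
        (pvStepA (rotor.length : Int) fl) (rotor, none, none)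
      = (rotor.getD 0 "" :: rotor.take k ++ rotor.drop (k + 1),
         some (rotor.getD k ""), lm2) := by
  induction k with
  | zero => omega
  | succ k ih =>
    by_cases hk1 : k = 0
    · subst hk1
      -- base case: one iteration, index 0
      obtain ⟨a, rotor', rfl⟩ : ∃ a r', rotor = a :: r' := by
        cases rotor with
        | nil => simp at hk
        | cons a r' => exact ⟨a, r', rfl⟩
      obtain ⟨b, t, rfl⟩ : ∃ b t, rotor' = b :: t := by
        cases rotor' with
        | nil => simp at hk
        | cons b t => exact ⟨b, t, rfl⟩
      refine ⟨none, ?_⟩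
      have h0 : PySem.List.pyRange 0 ((1 : Nat) : Int) 1 = [0] := by
        have := PySem.List.pyRange_one_singleton (a := (0 : Int))
        simpa using this
      rw [h0]
      simp only [List.foldl_cons, List.foldl_nil, pvStepA]
      simp only [PySem.List.pyGetD, PySem.List.pySetD, PySem.List.pySet?,
                 PySem.List.pyGet?, PySem.List.pyIdx?, List.length_cons]
      norm_num
      rw [if_neg (by omega : ¬((0 : Int) = (t.length : Int) + 1))]
      rw [if_pos (by positivity : (0 : Int) ≤ (t.length : Int) + 1)]
      simp
    · -- inductive step: iteration with index k, 1 ≤ k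
      obtain ⟨lm2, hIH⟩ := ih (by omega) (by omega)
      have hsplit : PySem.List.pyRange 0 ((k + 1 : Nat) : Int) 1
          = PySem.List.pyRange 0 (k : Int) 1 ++ [(k : Int)] := by
        have : ((k + 1 : Nat) : Int) = (k : Int) + 1 := by push_cast; ring
        rw [this, PySem.List.pyRange_one_succ_right (by positivity)]
      rw [hsplit, List.foldl_append, hIH]
      simp only [List.foldl_cons, List.foldl_nil]
      refine ⟨some (rotor.getD (k + 1) ""), ?_⟩
      have hkn : k + 1 < rotor.length := by omega
      have hne1 : ((k : Nat) : Int) ≠ (rotor.length : Int) - 1 := by omega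
      have hne0 : ((k : Nat) : Int) ≠ 0 := by omega
      rw [pvStepA]
      rw [if_pos hne1, if_neg hne0]
      have hcast : ((k : Nat) : Int) + 1 = ((k + 1 : Nat) : Int) := by push_cast; ring
      rw [hcast, PySem.List.pyGetD_natCast, PySem.List.pySetD_natCast]
      have hlen_take : (rotor.getD 0 "" :: rotor.take k).length = k + 1 := by
        simp [List.length_take]; omega
      have hdrop : rotor.drop (k + 1) = rotor[k + 1] :: rotor.drop (k + 2) :=
        List.drop_eq_getElem_cons hkn
      have htake : rotor.take (k + 1) = rotor.take k ++ [rotor[k]] := by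
        rw [List.take_add_one]
        simp [List.getElem?_eq_getElem (by omega : k < rotor.length)]
      simp only [Prod.mk.injEq]
      refine ⟨?_, ?_, ?_⟩
      · -- the list component
        rw [List.set_append_right _ _ (by omega)]
        rw [hlen_take]
        have hidx : k + 1 - (k + 1) = 0 := by omega
        rw [hidx, hdrop]
        simp only [List.set_cons_zero, Option.getD_some]
        rw [List.getD_eq_getElem rotor "" (by omega : k < rotor.length)]
        rw [htake]
        simp only [List.cons_append, List.append_assoc]
        norm_num
      all_goals
        rw [List.getD_append_right _ _ _ _ (by omega), hlen_take]
        have hidx : k + 1 - (k + 1) = 0 := by omega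
        rw [hidx, hdrop]
        simp

theorem rotation_right_rotor_spec : Claim_equal_rotation_right_rotor := by
  intro rotor _ hpre
  unfold Spec_rotation_right_rotor
  obtain ⟨ys, x, rfl⟩ : ∃ ys x, rotor = ys ++ [x] := by
    rcases List.eq_nil_or_concat rotor with h | ⟨L, b, h⟩
    · exact absurd h hpre
    · exact ⟨L, b, by simpa [List.concat_eq_append] using h⟩
  -- B's value
  have hB : rotation_right_rotor_alt (ys ++ [x]) = x :: ys := by
    unfold rotation_right_rotor_alt
    rw [PySem.List.pop?_last]
    exact PySem.List.insert_zero ys x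
  rw [hB]
  -- A's final_letter
  have hlen : (ys ++ [x]).length = ys.length + 1 := by simp
  have hfl : PySem.List.pyGet? (ys ++ [x]) (((ys ++ [x]).length : Int) - 1) = some x := by
    have hc : (((ys ++ [x]).length : Int) - 1) = ((ys.length : Nat) : Int) := by
      rw [hlen]; push_cast; ring
    rw [hc, PySem.List.pyGet?_natCast]
    simp
  unfold rotation_right_rotor
  rw [hfl]
  dsimp only
  by_cases hys : ys = []
  · -- single-element list: the only iteration takes the else branch
    subst hys
    simp only [List.nil_append, List.length_cons, List.length_nil]
    have h0 : PySem.List.pyRange 0 ((0 + 1 : Nat) : Int) 1 = [0] := by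
      have := PySem.List.pyRange_one_singleton (a := (0 : Int))
      simpa using this
    rw [h0]
    simp [pvStepA, PySem.List.pySetD, PySem.List.pySet?, PySem.List.pyIdx?]
  · -- length ≥ 2: invariant at k = len-1, then the last iteration writes slot 0
    have hys1 : 1 ≤ ys.length := by
      cases ys with
      | nil => exact absurd rfl hys
      | cons _ _ => simp
    have hsplit : PySem.List.pyRange 0 (((ys ++ [x]).length : Nat) : Int) 1
        = PySem.List.pyRange 0 ((ys.length : Nat) : Int) 1 ++ [((ys.length : Nat) : Int)] := by
      have hc : (((ys ++ [x]).length : Nat) : Int) = ((ys.length : Nat) : Int) + 1 := by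
        rw [hlen]; push_cast; ring
      rw [hc, PySem.List.pyRange_one_succ_right (by positivity)]
    rw [hsplit, List.foldl_append]
    obtain ⟨lm2, hInv⟩ := pvInvA (ys ++ [x]) x ys.length hys1 (by simp)
    rw [hInv]
    simp only [List.foldl_cons, List.foldl_nil]
    rw [pvStepA]
    rw [if_neg (by push_cast [hlen]; omega)]
    have hdropnil : (ys ++ [x]).drop (ys.length + 1) = [] := by
      simp
    have htakeys : (ys ++ [x]).take ys.length = ys := List.take_left
    rw [hdropnil, htakeys]
    simp [PySem.List.pySetD, PySem.List.pySet?, PySem.List.pyIdx?]
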